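-- pv_equiv track=rewrite | github.com/kippsss/SABER-PLISH_barcodes | assign_bc.py | get_complexity_numerator
-- ===== SOURCE A (Python) =====
-- import math
--
-- def get_complexity_numerator(seq):
--     length = len(seq)
--     num_words = []
--     for word_size in range(1, length):
--         words = {}
--         for i in range(length-word_size+1):
--             word = seq[i: i+word_size]
--             if word not in words.keys():
--                 words[word] = 1
--         num_words.append(len(words))
--     complexity_numerator = math.prod(num_words)
--     return complexity_numerator
-- ===== SOURCE B (Python) =====
-- def get_complexity_numerator(seq):
--     n = len(seq)
--     result = 1
--     for k in range(1, n):
--         subs = sorted(seq[i:i+k] for i in range(n - k + 1))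
--         result *= 1 + sum(1 for a, b in zip(subs, subs[1:]) if a != b)
--     return result
-- ===== Notes on version B (the rewrite author's own statement) =====
-- stated objective: alternative
-- what changed: B replaces A's per-length insertion-ordered dictionary of seen substrings by sort-then-scan distinct counting: for each length it sorts the substrings and counts adjacent unequal pairs, multiplying the counts as it goes instead of collecting them in a list.
import Mathlib
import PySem

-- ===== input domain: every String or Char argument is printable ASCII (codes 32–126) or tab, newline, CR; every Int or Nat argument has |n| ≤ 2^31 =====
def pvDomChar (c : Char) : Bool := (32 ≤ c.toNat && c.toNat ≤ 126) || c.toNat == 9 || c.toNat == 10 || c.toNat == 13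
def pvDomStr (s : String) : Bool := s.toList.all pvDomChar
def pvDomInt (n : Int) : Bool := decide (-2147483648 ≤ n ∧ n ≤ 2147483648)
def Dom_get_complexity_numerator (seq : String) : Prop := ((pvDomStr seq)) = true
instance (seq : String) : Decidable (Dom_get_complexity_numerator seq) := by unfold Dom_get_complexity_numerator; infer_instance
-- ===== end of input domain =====

-- B replaces A's per-length dictionary of seen substrings by sort-then-scan distinct counting
-- (sort the substrings of each length, count adjacent unequal pairs); alternative algorithm, same result.

-- ===== PORT A =====
def get_complexity_numerator (seq : String) : Int :=
  let l := seq.toList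
  let length : Int := l.length
  let num_words : List Int :=
    (PySem.List.pyRange 1 length 1).foldl (fun num_words word_size =>
      let words : PySem.Dict (List Char) Int :=
        (PySem.List.pyRange 0 (length - word_size + 1) 1).foldl
          (fun words i =>
            let word := PySem.List.slice l (some i) (some (i + word_size))
            if ¬ (word ∈ words.keys) then words.insert word 1 else words)
          PySem.Dict.empty
      num_words ++ [(words.size : Int)]) []
  num_words.foldl (· * ·) 1

-- ===== PORT B =====
def get_complexity_numerator_alt (seq : String) : Int :=
  let l := seq.toList
  let n : Int := l.length
  (PySem.List.pyRange 1 n 1).foldl (fun result k =>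
    let subs : List (List Char) :=
      PySem.List.sorted ((PySem.List.pyRange 0 (n - k + 1) 1).map
        (fun i => PySem.List.slice l (some i) (some (i + k)))) (fun x => x) false
    result * (1 + ((subs.zip (PySem.List.slice subs (some 1) none)).map
        (fun p => if p.1 ≠ p.2 then (1 : Int) else 0)).foldl (· + ·) 0)) 1

-- ===== PRECONDITION & SPEC =====
def Spec_get_complexity_numerator (seq : String) (out : Int) : Prop := out = get_complexity_numerator_alt seq
instance (seq : String) (out : Int) : Decidable (Spec_get_complexity_numerator seq out) := by unfold Spec_get_complexity_numerator; infer_instance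

-- ===== CLAIM (what is proved, stated in full; the proofs are below) =====
def Claim_equal_get_complexity_numerator : Prop := ∀ (seq : String), Dom_get_complexity_numerator seq → Spec_get_complexity_numerator seq (get_complexity_numerator seq)

-- ===== LEMMAS AND PROOFS =====

-- A's dict-building loop: the keys collected are PySem.Set.update of the starting keys.
theorem pv_dict_keys (L : List (List Char)) :
    ∀ (d : PySem.Dict (List Char) Int),
      (L.foldl (fun d w => if ¬ (w ∈ d.keys) then d.insert w 1 else d) d).keys
        = PySem.Set.update d.keys L := by
  induction L with
  | nil => intro d; simp [PySem.Set.update]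
  | cons w t ih =>
    intro d
    have hstep : ((if ¬ (w ∈ d.keys) then d.insert w 1 else d)).keys
        = PySem.Set.add d.keys w := by
      by_cases h : w ∈ d.keys
      · simp [h, PySem.Set.add]
      · have hc : d.contains w = false := by
          rw [← Bool.not_eq_true]
          exact fun hcontra => h ((PySem.Dict.contains_iff_mem_keys d w).mp hcontra)
        rw [if_pos h, PySem.Dict.keys_insert_of_not_contains d 1 hc]
        simp [PySem.Set.add, h]
    simp only [PySem.Set.update, List.foldl_cons]
    rw [ih, hstep]
    rfl

theorem pv_foldl_sum (m : List Int) : m.foldl (· + ·) 0 = m.sum := by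
  simpa using PySem.List.foldl_add m id 0

-- sorted-and-scan: on a nonempty ≤-sorted list, 1 + #adjacent-unequal-pairs = #distinct.
theorem pv_bsum (s : List (List Char)) :
    s.Pairwise (· ≤ ·) → s ≠ [] →
    1 + ((s.zip s.tail).map (fun p => if p.1 ≠ p.2 then (1 : Int) else 0)).sum
      = (s.toFinset.card : Int) := by
  induction s with
  | nil => intro _ hne; exact absurd rfl hne
  | cons a t ih =>
    intro hs _
    cases t with
    | nil => simp
    | cons b t2 =>
      have hs' : (b :: t2).Pairwise (· ≤ ·) := hs.tail
      have hab : a ≤ b := (List.pairwise_cons.mp hs).1 b (by simp)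
      have ihv := ih hs' (by simp)
      simp only [List.tail_cons, List.zip_cons_cons, List.map_cons, List.sum_cons] at ihv ⊢
      by_cases hab2 : a = b
      · subst hab2
        have hfin : (a :: a :: t2).toFinset = (a :: t2).toFinset := by ext x; simp
        rw [hfin, ← ihv]
        simp
      · have hnotmem : a ∉ (b :: t2).toFinset := by
          simp only [List.mem_toFinset, List.mem_cons]
          rintro (h | h)
          · exact hab2 h
          · exact hab2 (le_antisymm hab ((List.pairwise_cons.mp hs').1 a h))
        have hcard : (a :: b :: t2).toFinset.card = (b :: t2).toFinset.card + 1 := by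
          rw [show (a :: b :: t2).toFinset = insert a (b :: t2).toFinset from List.toFinset_cons,
            Finset.card_insert_of_notMem hnotmem]
        rw [hcard, if_pos hab2]
        push_cast
        omega

theorem pv_ofList_card (L : List (List Char)) :
    ((PySem.Set.ofList L).length : Int) = (L.toFinset.card : Int) := by
  have h2 : (PySem.Set.ofList L).toFinset = L.toFinset := by
    ext x; simp [PySem.Set.mem_ofList]
  rw [← List.toFinset_card_of_nodup (PySem.Set.nodup_ofList L), h2]

-- per-word-size agreement: dict-size = sort-and-scan count
theorem pv_factor (l : List Char) (k : Int) (_hk1 : 1 ≤ k) (hk2 : k < (l.length : Int)) :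
    (((PySem.List.pyRange 0 ((l.length : Int) - k + 1) 1).foldl
        (fun (words : PySem.Dict (List Char) Int) i =>
          if ¬ (PySem.List.slice l (some i) (some (i + k)) ∈ words.keys) then
            words.insert (PySem.List.slice l (some i) (some (i + k))) 1
          else words)
        PySem.Dict.empty).size : Int)
      = 1 + (((PySem.List.sorted ((PySem.List.pyRange 0 ((l.length : Int) - k + 1) 1).map
            (fun i => PySem.List.slice l (some i) (some (i + k)))) (fun x => x) false).zip
          (PySem.List.slice (PySem.List.sorted ((PySem.List.pyRange 0 ((l.length : Int) - k + 1) 1).map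
            (fun i => PySem.List.slice l (some i) (some (i + k)))) (fun x => x) false) (some 1) none)).map
          (fun p => if p.1 ≠ p.2 then (1 : Int) else 0)).foldl (· + ·) 0 := by
  set L : List (List Char) := (PySem.List.pyRange 0 ((l.length : Int) - k + 1) 1).map
      (fun i => PySem.List.slice l (some i) (some (i + k))) with hL
  have hLne : L ≠ [] := by
    have : L.length = ((l.length : Int) - k + 1 - 0).toNat := by
      rw [hL, List.length_map, PySem.List.length_pyRange_one]
    intro h
    rw [h] at this
    simp at this
    omega
  set s := PySem.List.sorted L (fun x => x) false with hsdef
  have hsne : s ≠ [] := fun h => hLne ((PySem.List.sorted_eq_nil_iff L _ false).mp h)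
  have hperm : s.Perm L := PySem.List.sorted_perm L _ false
  have hfin : s.toFinset = L.toFinset := by
    ext x
    simp only [List.mem_toFinset]
    exact ⟨fun h => hperm.mem_iff.mp h, fun h => hperm.mem_iff.mpr h⟩
  -- A side: the inner fold over indices is a fold over the substring list L
  have hA : (PySem.List.pyRange 0 ((l.length : Int) - k + 1) 1).foldl
        (fun (words : PySem.Dict (List Char) Int) i =>
          if ¬ (PySem.List.slice l (some i) (some (i + k)) ∈ words.keys) then
            words.insert (PySem.List.slice l (some i) (some (i + k))) 1
          else words)
        PySem.Dict.empty
      = L.foldl (fun d w => if ¬ (w ∈ d.keys) then d.insert w 1 else d) PySem.Dict.empty := by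
    rw [hL, List.foldl_map]
  rw [hA]
  have hsize : ∀ (d : PySem.Dict (List Char) Int), d.size = d.keys.length := by
    intro d; simp [PySem.Dict.size, PySem.Dict.keys]
  rw [hsize, pv_dict_keys L PySem.Dict.empty]
  have hupd : PySem.Set.update (PySem.Dict.empty : PySem.Dict (List Char) Int).keys L
      = PySem.Set.ofList L := by
    rw [PySem.Dict.keys_empty]; rfl
  rw [hupd, PySem.List.slice_from_one, pv_foldl_sum,
    pv_bsum s (by
      rw [hsdef]
      convert PySem.List.sorted_pairwise (κ := List Char) L (fun x => x) using 2) hsne,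
    hfin]
  exact pv_ofList_card L

-- ===== VERDICT (by name: the statement is the Claim_ definition above) =====
theorem get_complexity_numerator_spec : Claim_equal_get_complexity_numerator := by
  intro seq _
  unfold Spec_get_complexity_numerator
  unfold get_complexity_numerator get_complexity_numerator_alt
  simp only []
  rw [PySem.List.foldl_append_singleton_eq_map, List.nil_append, List.foldl_map]
  apply PySem.List.foldl_congr_mem
  intro acc k hk
  have hk' := PySem.List.mem_pyRange_one.mp hk
  rw [pv_factor seq.toList k hk'.1 hk'.2]
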